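-- pv_equiv track=rewrite | github.com/ISamyak/Algo_27thdec23 | Hidden_view_from_OI.py | getting_small_table_near_spot_price
-- ===== SOURCE A (Python) =====
-- def getting_small_table_near_spot_price(OI_Data,cl_price):
-- 	start = cl_price - (cl_price%50) -100
-- 	strike_price=[]
-- 	for i in range(6):
-- 		strike_price.append(start)
-- 		start=start+50
--
--
-- 	selected_data = [row for row in OI_Data if row[0] in strike_price]
--
-- 	return selected_data
-- ===== SOURCE B (Python) =====
-- def getting_small_table_near_spot_price(OI_Data, cl_price):
--     start = cl_price - (cl_price % 50) - 100
--     hits = []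
--     for k in range(6):
--         strike = start + 50 * k
--         for idx, row in enumerate(OI_Data):
--             if row[0] == strike:
--                 hits.append((idx, row))
--     hits.sort(key=lambda p: p[0])
--     return [row for _, row in hits]
-- ===== Notes on version B (the rewrite author's own statement) =====
-- stated objective: alternative
-- what changed: B traverses strike-major: for each of the six strikes it scans the data collecting matching rows tagged with their original indices, then sorts the collected hits by index to restore input order, instead of A's single row-major pass testing membership in a materialised strike list.
import Mathlib
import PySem

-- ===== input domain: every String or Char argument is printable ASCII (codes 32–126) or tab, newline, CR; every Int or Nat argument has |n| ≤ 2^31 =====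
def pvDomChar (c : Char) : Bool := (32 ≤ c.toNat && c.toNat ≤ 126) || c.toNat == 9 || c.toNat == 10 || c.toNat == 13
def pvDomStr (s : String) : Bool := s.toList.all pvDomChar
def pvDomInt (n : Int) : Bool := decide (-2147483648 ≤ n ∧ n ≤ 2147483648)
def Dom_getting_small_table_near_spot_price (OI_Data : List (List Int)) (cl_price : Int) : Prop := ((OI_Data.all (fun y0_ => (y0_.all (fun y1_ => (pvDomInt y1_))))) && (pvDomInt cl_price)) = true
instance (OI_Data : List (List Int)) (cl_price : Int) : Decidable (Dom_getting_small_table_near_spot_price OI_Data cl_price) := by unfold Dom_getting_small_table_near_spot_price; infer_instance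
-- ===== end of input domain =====

-- B collects rows strike-major (per-strike scans with indices) and sorts by index, instead of A's row-major membership filter (objective: alternative).


-- ===== PORT A =====
-- the for-loop over range(6) accumulating (strike_price, start)
def getting_small_table_near_spot_price (OI_Data : List (List Int)) (cl_price : Int) : List (List Int) :=
  let start := cl_price - (PySem.Int.mod cl_price 50) - 100
  let st := (PySem.List.pyRange 0 6 1).foldl
    (fun (acc : List Int × Int) _ => (acc.1 ++ [acc.2], acc.2 + 50)) (([] : List Int), start)
  let strike_price := st.1
  OI_Data.filter (fun row =>
    match PySem.List.pyGet? row 0 with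
    | some v => strike_price.contains v
    | none => false)   -- Python raises IndexError here; excluded by Pre_

-- ===== PORT B =====
def getting_small_table_near_spot_price_alt (OI_Data : List (List Int)) (cl_price : Int) : List (List Int) :=
  let start := cl_price - (PySem.Int.mod cl_price 50) - 100
  let hits := (PySem.List.pyRange 0 6 1).foldl (fun (acc : List (Int × List Int)) k =>
      let strike := start + 50 * k
      (PySem.List.enumerate OI_Data).foldl (fun acc2 p =>
        if (match PySem.List.pyGet? p.2 0 with
            | some v => v == strike
            | none => false) then acc2 ++ [p] else acc2) acc) []   -- row[0] on an empty row raises in Python; excluded by Pre_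
  (PySem.List.sorted hits (fun p => p.1)).map (fun p => p.2)

-- ===== PRECONDITION & SPEC =====
-- Pre_: every row is nonempty (row[0] raises IndexError on an empty row, in A and in B alike).
def Pre_getting_small_table_near_spot_price (OI_Data : List (List Int)) (_cl_price : Int) : Prop :=
  ∀ row ∈ OI_Data, row ≠ []
instance (OI_Data : List (List Int)) (cl_price : Int) : Decidable (Pre_getting_small_table_near_spot_price OI_Data cl_price) := by unfold Pre_getting_small_table_near_spot_price; infer_instance
def pvWitness_getting_small_table_near_spot_price : List (List Int) × Int := ([[100, 7], [150, 8], [333, 9]], 120)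

def Spec_getting_small_table_near_spot_price (OI_Data : List (List Int)) (cl_price : Int) (out : List (List Int)) : Prop := out = getting_small_table_near_spot_price_alt OI_Data cl_price
instance (OI_Data : List (List Int)) (cl_price : Int) (out : List (List Int)) : Decidable (Spec_getting_small_table_near_spot_price OI_Data cl_price out) := by unfold Spec_getting_small_table_near_spot_price; infer_instance

-- ===== CLAIM =====
def Claim_equal_getting_small_table_near_spot_price : Prop := ∀ (OI_Data : List (List Int)) (cl_price : Int), Dom_getting_small_table_near_spot_price OI_Data cl_price → Pre_getting_small_table_near_spot_price OI_Data cl_price → Spec_getting_small_table_near_spot_price OI_Data cl_price (getting_small_table_near_spot_price OI_Data cl_price)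

-- ===== LEMMAS AND PROOFS =====
-- the six strikes, and the per-row test "row[0] == t"
def pvSS (s : Int) : List Int := [s, s + 50, s + 100, s + 150, s + 200, s + 250]
def pvQ (t : Int) (p : Int × List Int) : Bool :=
  match PySem.List.pyGet? p.2 0 with
  | some v => v == t
  | none => false

theorem pvQ_disj_filter_perm {α : Type} (a b : α → Bool) (h : ∀ x, a x = true → b x = false)
    (l : List α) :
    (l.filter a ++ l.filter b).Perm (l.filter (fun x => a x || b x)) := by
  induction l with
  | nil => simp
  | cons x t ih =>
    by_cases ha : a x = true
    · simp [ha, h x ha]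
      exact ih
    · simp only [Bool.not_eq_true] at ha
      by_cases hb : b x = true
      · simp [ha, hb]
        exact (List.perm_middle).trans (ih.cons x)
      · simp only [Bool.not_eq_true] at hb
        simp [ha, hb]
        exact ih

theorem pvFlatMap_filter_perm (E : List (Int × List Int)) (ss : List Int) (hnd : ss.Nodup) :
    (ss.flatMap (fun s => E.filter (pvQ s))).Perm
      (E.filter (fun p => ss.any (fun s => pvQ s p))) := by
  induction ss with
  | nil => simp
  | cons s rest ih =>
    have hnd' := hnd
    rw [List.nodup_cons] at hnd'
    have hdisj : ∀ p, pvQ s p = true → (rest.any (fun s' => pvQ s' p)) = false := by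
      intro p hp
      simp only [List.any_eq_false]
      intro s' hs'
      unfold pvQ at hp ⊢
      cases hv : PySem.List.pyGet? p.2 0 with
      | none => simp
      | some v =>
        rw [hv] at hp
        simp only [beq_iff_eq] at hp
        intro hvs'
        apply hnd'.1
        have hse : v = s' := beq_iff_eq.mp hvs'
        rw [← hse, hp] at hs'
        exact hs'
    simp only [List.flatMap_cons]
    refine (List.Perm.append_left _ (ih hnd'.2)).trans ?_
    simpa [List.any_cons] using
      pvQ_disj_filter_perm (pvQ s) (fun p => rest.any (fun s' => pvQ s' p)) hdisj E

theorem pvMap_snd_filter_enumerate (xs : List (List Int)) (s : Int) (g : List Int → Bool) :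
    (((PySem.List.enumerate xs s).filter (fun p => g p.2)).map (fun p => p.2)) = xs.filter g := by
  induction xs generalizing s with
  | nil => simp [PySem.List.enumerate_nil]
  | cons x t ih =>
    rw [PySem.List.enumerate_cons]
    by_cases hg : g x = true
    · simp [hg, ih]
    · simp only [Bool.not_eq_true] at hg
      simp [hg, ih]

theorem strike_fold (s : Int) :
    ((PySem.List.pyRange 0 6 1).foldl
      (fun (acc : List Int × Int) _ => (acc.1 ++ [acc.2], acc.2 + 50)) (([] : List Int), s)).1 =
      [s, s + 50, s + 100, s + 150, s + 200, s + 250] := by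
  simp [PySem.List.pyRange, List.range_succ]
  omega

-- ===== VERDICT =====
theorem getting_small_table_near_spot_price_spec : Claim_equal_getting_small_table_near_spot_price := by
  intro OI_Data cl_price _ _
  unfold Spec_getting_small_table_near_spot_price
  unfold getting_small_table_near_spot_price getting_small_table_near_spot_price_alt
  simp only [strike_fold]
  set s := cl_price - (PySem.Int.mod cl_price 50) - 100 with hs
  set E := PySem.List.enumerate OI_Data 0 with hE
  -- B's hits as a flatMap of per-strike filters
  have hinner : ∀ (acc : List (Int × List Int)) (k : Int),
      E.foldl (fun acc2 p =>
        if (match PySem.List.pyGet? p.2 0 with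
            | some v => v == s + 50 * k
            | none => false) then acc2 ++ [p] else acc2) acc
      = acc ++ E.filter (pvQ (s + 50 * k)) := by
    intro acc k
    exact PySem.List.foldl_append_if_eq_filter (fun p => pvQ (s + 50 * k) p) E acc
  have hrange : PySem.List.pyRange 0 6 1 = [0, 1, 2, 3, 4, 5] := by decide
  have houter :
      (PySem.List.pyRange 0 6 1).foldl (fun (acc : List (Int × List Int)) k =>
        E.foldl (fun acc2 p =>
          if (match PySem.List.pyGet? p.2 0 with
              | some v => v == s + 50 * k
              | none => false) then acc2 ++ [p] else acc2) acc) []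
      = (pvSS s).flatMap (fun t => E.filter (pvQ t)) := by
    rw [hrange]
    simp only [List.foldl_cons, List.foldl_nil, hinner]
    simp only [pvSS, List.flatMap_cons, List.flatMap_nil, List.append_nil, List.nil_append,
      List.append_assoc]
    norm_num
  have hnd : (pvSS s).Nodup := by
    simp [pvSS, List.nodup_cons]
  have hperm := pvFlatMap_filter_perm E (pvSS s) hnd
  have hpw : (E.filter (fun p => (pvSS s).any (fun t => pvQ t p))).Pairwise
      (fun a b => a.1 < b.1) := by
    rw [hE]
    exact List.Pairwise.filter _ (PySem.List.pairwise_lt_enumerate OI_Data 0)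
  have hsorted :
      PySem.List.sorted ((pvSS s).flatMap (fun t => E.filter (pvQ t))) (fun p => p.1) false
      = E.filter (fun p => (pvSS s).any (fun t => pvQ t p)) :=
    PySem.List.sorted_eq_of_perm_of_pairwise_lt _ _ _ hperm.symm hpw
  have hmapsnd :
      ((E.filter (fun p => (pvSS s).any (fun t => pvQ t p))).map (fun p => p.2))
      = OI_Data.filter (fun row => (pvSS s).any (fun t =>
          match PySem.List.pyGet? row 0 with
          | some v => v == t
          | none => false)) := by
    rw [hE]
    simp only [pvQ]
    exact pvMap_snd_filter_enumerate OI_Data 0 (fun row => (pvSS s).any (fun t =>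
      match PySem.List.pyGet? row 0 with
      | some v => v == t
      | none => false))
  have hpred : ∀ row ∈ OI_Data,
      (match PySem.List.pyGet? row 0 with
        | some v => ([s, s + 50, s + 100, s + 150, s + 200, s + 250] : List Int).contains v
        | none => false)
      = (pvSS s).any (fun t =>
          match PySem.List.pyGet? row 0 with
          | some v => v == t
          | none => false) := by
    intro row _
    cases hv : PySem.List.pyGet? row 0 with
    | none => simp
    | some v =>
      simp [pvSS, List.contains_eq_mem, beq_eq_decide]
  rw [houter, hsorted, hmapsnd]
  exact List.filter_congr hpred
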